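-- pv_equiv track=rewrite | github.com/trongtam123456/Coding | hackerrank/300-bai-code-thieu-nhi mely/Thành phố bí ẩn.py | find_kth_one_position
-- ===== SOURCE A (Python) =====
-- def find_kth_one_position(bin, k):
--     soluong = 0
--
--     for i in range(len(bin)):
--         if bin[i] == '1':
--             soluong += 1
--             if soluong == k:
--                 return i
--
--     return -1
-- ===== SOURCE B (Python) =====
-- def find_kth_one_position(bin, k):
--     ones = [i for i, c in enumerate(bin) if c == '1']
--     if 1 <= k <= len(ones):
--         return ones[k - 1]
--     return -1
-- ===== Notes on version B (the rewrite author's own statement) =====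
-- stated objective: simpler
-- what changed: Replaces the counting scan with early return by collecting all '1' positions via a comprehension and indexing the k-th one from that table.
import Mathlib
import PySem

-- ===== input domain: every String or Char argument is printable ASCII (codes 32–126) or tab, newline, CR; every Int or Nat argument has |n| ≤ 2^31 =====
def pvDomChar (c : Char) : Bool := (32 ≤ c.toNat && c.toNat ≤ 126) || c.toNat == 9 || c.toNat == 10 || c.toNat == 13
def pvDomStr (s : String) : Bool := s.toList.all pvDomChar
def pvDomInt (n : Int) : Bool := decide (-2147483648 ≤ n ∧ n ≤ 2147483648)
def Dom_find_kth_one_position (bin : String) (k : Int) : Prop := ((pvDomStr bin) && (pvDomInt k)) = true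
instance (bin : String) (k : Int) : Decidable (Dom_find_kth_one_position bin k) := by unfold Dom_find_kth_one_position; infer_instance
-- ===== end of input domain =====

-- B replaces A's counting scan (early return at the k-th '1') by collecting all '1'
-- positions and indexing into that table; objective: simpler, same cost.


-- ===== PORT A =====
-- A's for-loop over range(len(bin)) with counter `soluong` and early return,
-- transcribed as structural recursion over the characters carrying index i and counter s.
def findKthLoop (k : Int) : List Char → Int → Int → Int
  | [], _, _ => -1
  | c :: rest, i, s =>
    if c = '1' then
      if s + 1 = k then i else findKthLoop k rest (i + 1) (s + 1)
    else findKthLoop k rest (i + 1) s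

def find_kth_one_position (bin : String) (k : Int) : Int :=
  findKthLoop k bin.toList 0 0

-- ===== PORT B =====
-- ones = [i for i, c in enumerate(bin) if c == '1']; return ones[k-1] if 1 <= k <= len(ones) else -1
def find_kth_one_position_alt (bin : String) (k : Int) : Int :=
  let ones := ((PySem.List.enumerate bin.toList 0).filter (fun p => p.2 = '1')).map (fun p => p.1)
  if 1 ≤ k ∧ k ≤ (ones.length : Int) then ones.getD (k - 1).toNat 0 else -1

-- ===== PRECONDITION & SPEC =====
def Spec_find_kth_one_position (bin : String) (k : Int) (out : Int) : Prop := out = find_kth_one_position_alt bin k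
instance (bin : String) (k : Int) (out : Int) : Decidable (Spec_find_kth_one_position bin k out) := by unfold Spec_find_kth_one_position; infer_instance

-- ===== CLAIM (what is proved, stated in full; the proofs are below) =====
def Claim_equal_find_kth_one_position : Prop := ∀ (bin : String) (k : Int), Dom_find_kth_one_position bin k → Spec_find_kth_one_position bin k (find_kth_one_position bin k)

-- ===== LEMMAS AND PROOFS =====

-- positions of '1' in l, indices starting at i
def onesFrom : List Char → Int → List Int
  | [], _ => []
  | c :: rest, i => if c = '1' then i :: onesFrom rest (i + 1) else onesFrom rest (i + 1)

lemma ones_eq (l : List Char) (i : Int) :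
    ((PySem.List.enumerate l i).filter (fun p => p.2 = '1')).map (fun p => p.1) = onesFrom l i := by
  induction l generalizing i with
  | nil => simp [PySem.List.enumerate_nil, onesFrom]
  | cons c rest ih =>
    simp only [PySem.List.enumerate_cons, List.filter_cons, onesFrom]
    by_cases h : c = '1' <;> simp [h, ih]

lemma loop_eq (k : Int) (l : List Char) (i s : Int) :
    findKthLoop k l i s =
      if s < k ∧ k ≤ s + ((onesFrom l i).length : Int)
      then (onesFrom l i).getD (k - 1 - s).toNat 0 else -1 := by
  induction l generalizing i s with
  | nil => simp [findKthLoop, onesFrom]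
  | cons c rest ih =>
    simp only [findKthLoop, onesFrom]
    by_cases h : c = '1'
    · simp only [h, if_true]
      by_cases hk : s + 1 = k
      · rw [if_pos hk]
        split_ifs with hcond
        · have h0 : (k - 1 - s).toNat = 0 := by omega
          simp [h0]
        · exfalso
          simp only [List.length_cons] at hcond
          push_cast at hcond
          omega
      · rw [if_neg hk, ih]
        simp only [List.length_cons]
        split_ifs with h1 h2 h2
        · have hidx : (k - 1 - s).toNat = (k - 1 - (s + 1)).toNat + 1 := by omega
          rw [hidx, List.getD_cons_succ]
        · exfalso; push_cast at h1 h2; omega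
        · exfalso; push_cast at h1 h2; omega
        · rfl
    · simp only [h, if_false]
      exact ih (i + 1) s

-- ===== VERDICT (by name: the statement is the Claim_ definition above) =====
theorem find_kth_one_position_spec : Claim_equal_find_kth_one_position := by
  intro bin k _
  unfold Spec_find_kth_one_position find_kth_one_position find_kth_one_position_alt
  rw [loop_eq, ones_eq]
  simp only [zero_add, sub_zero]
  split_ifs with ha hb <;> first | rfl | omega
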